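-- pv_equiv track=rewrite | github.com/RonjaZijd/LinearMethodVQE | LMLibrary2.py | numb_to_wire
-- ===== SOURCE A (Python) =====
-- def numb_to_wire(num, U_gates): #works!
--     wire = 0
--     local_pos = 0
--     iter = 0
--     loop_breaker = False
--     for i in range(len(U_gates)):
--         for j in range(len(U_gates[i])):
--             if iter==num:
--                 local_pos = j
--                 loop_breaker =True
--                 break; #break out of both loops
--             else:
--                 iter = iter+1
--         if (loop_breaker):
--             break
--         wire = wire+1
--
--     return wire, local_pos
-- ===== SOURCE B (Python) =====
-- def numb_to_wire(num, U_gates):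
--     # Subtract each row's length from num until it fits inside a row.
--     if num >= 0:
--         r = num
--         for wire, row in enumerate(U_gates):
--             if r < len(row):
--                 return wire, r
--             r -= len(row)
--     return len(U_gates), 0
-- ===== Notes on version B (the rewrite author's own statement) =====
-- stated objective: alternative
-- what changed: B replaces A's element-by-element double loop with counter by a single pass that subtracts each row's length from num, returning as soon as num fits in the current row.
import Mathlib
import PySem

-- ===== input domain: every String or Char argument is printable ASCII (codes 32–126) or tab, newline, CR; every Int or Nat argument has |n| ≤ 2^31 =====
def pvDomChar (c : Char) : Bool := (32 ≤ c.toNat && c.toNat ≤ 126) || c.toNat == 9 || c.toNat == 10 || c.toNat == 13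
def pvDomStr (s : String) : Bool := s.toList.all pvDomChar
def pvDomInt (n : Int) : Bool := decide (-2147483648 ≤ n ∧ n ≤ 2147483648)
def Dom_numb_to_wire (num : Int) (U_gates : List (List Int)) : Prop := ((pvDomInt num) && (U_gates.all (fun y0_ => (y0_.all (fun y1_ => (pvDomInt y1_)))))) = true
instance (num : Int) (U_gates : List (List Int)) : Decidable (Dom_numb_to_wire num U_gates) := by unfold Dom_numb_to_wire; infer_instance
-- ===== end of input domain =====

-- B replaces A's element-by-element double loop by a single pass subtracting row lengths (alternative algorithm).

-- ===== PORT A =====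
-- inner loop over j = 0 .. len-1: returns (iter', some j) on break, (iter', none) otherwise
def nwInner (num : Int) : Nat → Int → Int → Int × Option Int
  | 0, iterv, _ => (iterv, none)
  | len + 1, iterv, j =>
      if iterv == num then (iterv, some j)
      else nwInner num len (iterv + 1) (j + 1)

-- outer loop over rows, carrying wire and iter; local_pos stays 0 unless the inner loop breaks
def nwOuter (num : Int) : List (List Int) → Int → Int → Int × Int
  | [], wire, _ => (wire, 0)
  | row :: rest, wire, iterv =>
      match nwInner num row.length iterv 0 with
      | (_, some j) => (wire, j)
      | (iter', none) => nwOuter num rest (wire + 1) iter'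

def numb_to_wire (num : Int) (U_gates : List (List Int)) : Int × Int :=
  nwOuter num U_gates 0 0

-- ===== PORT B =====
def nwGo : Int → List (List Int) → Int → Int × Int
  | _, [], wire => (wire, 0)
  | r, row :: rest, wire =>
      if r < (row.length : Int) then (wire, r)
      else nwGo (r - row.length) rest (wire + 1)

def numb_to_wire_alt (num : Int) (U_gates : List (List Int)) : Int × Int :=
  if 0 ≤ num then nwGo num U_gates 0
  else ((U_gates.length : Int), 0)

-- ===== PRECONDITION & SPEC =====
def Spec_numb_to_wire (num : Int) (U_gates : List (List Int)) (out : Int × Int) : Prop := out = numb_to_wire_alt num U_gates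
instance (num : Int) (U_gates : List (List Int)) (out : Int × Int) : Decidable (Spec_numb_to_wire num U_gates out) := by unfold Spec_numb_to_wire; infer_instance

-- ===== CLAIM (what is proved, stated in full; the proofs are below) =====
def Claim_equal_numb_to_wire : Prop := ∀ (num : Int) (U_gates : List (List Int)), Dom_numb_to_wire num U_gates → Spec_numb_to_wire num U_gates (numb_to_wire num U_gates)

-- ===== LEMMAS AND PROOFS =====

-- inner loop finds the element when it lies in this row
theorem nwInner_found (num : Int) (len : Nat) (iterv j : Int)
    (h1 : iterv ≤ num) (h2 : num - iterv < (len : Int)) :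
    nwInner num len iterv j = (num, some (j + (num - iterv))) := by
  induction len generalizing iterv j with
  | zero => simp at h2; omega
  | succ n ih =>
      unfold nwInner
      by_cases h : iterv = num
      · subst h; simp
      · simp only [beq_iff_eq, if_neg h]
        rw [ih (iterv + 1) (j + 1) (by omega) (by push_cast at h2 ⊢; omega)]
        have : j + 1 + (num - (iterv + 1)) = j + (num - iterv) := by omega
        rw [this]

-- inner loop runs through when the element is not in this row
theorem nwInner_miss (num : Int) (len : Nat) (iterv j : Int)
    (h : ¬ (iterv ≤ num ∧ num - iterv < (len : Int))) :
    nwInner num len iterv j = (iterv + len, none) := by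
  induction len generalizing iterv j with
  | zero => simp [nwInner]
  | succ n ih =>
      unfold nwInner
      have hne : iterv ≠ num := by push_cast at h ⊢; omega
      simp only [beq_iff_eq, if_neg hne]
      rw [ih (iterv + 1) (j + 1) (by push_cast at h ⊢; omega)]
      have : iterv + 1 + (n : Int) = iterv + ((n : Int) + 1) := by omega
      push_cast
      rw [this]

-- main invariant: A's outer loop with counter iterv equals B's loop with remainder num - iterv
theorem nwOuter_eq_nwGo (num : Int) (rows : List (List Int)) (wire iterv : Int)
    (hnn : 0 ≤ iterv) (hle : iterv ≤ num) :
    nwOuter num rows wire iterv = nwGo (num - iterv) rows wire := by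
  induction rows generalizing wire iterv with
  | nil => simp [nwOuter, nwGo]
  | cons row rest ih =>
      unfold nwOuter nwGo
      by_cases h : num - iterv < (row.length : Int)
      · rw [nwInner_found num row.length iterv 0 hle h]
        simp [h]
      · rw [nwInner_miss num row.length iterv 0 (by omega)]
        simp only [if_neg h]
        rw [ih (wire + 1) (iterv + row.length) (by positivity) (by omega)]
        congr 1
        omega

-- negative num: A's counter (always ≥ 0) never matches, so A walks all rows
theorem nwOuter_neg (num : Int) (rows : List (List Int)) (wire iterv : Int)
    (hnn : 0 ≤ iterv) (hneg : num < 0) :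
    nwOuter num rows wire iterv = (wire + rows.length, 0) := by
  induction rows generalizing wire iterv with
  | nil => simp [nwOuter]
  | cons row rest ih =>
      unfold nwOuter
      rw [nwInner_miss num row.length iterv 0 (by omega)]
      show nwOuter num rest (wire + 1) (iterv + row.length) = _
      rw [ih (wire + 1) (iterv + row.length) (by positivity)]
      simp only [List.length_cons]
      have : wire + 1 + (rest.length : Int) = wire + ((rest.length : Int) + 1) := by omega
      rw [this]
      push_cast
      rfl

-- ===== VERDICT (by name: the statement is the Claim_ definition above) =====
theorem numb_to_wire_spec : Claim_equal_numb_to_wire := by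
  intro num U_gates _
  unfold Spec_numb_to_wire numb_to_wire numb_to_wire_alt
  by_cases h : 0 ≤ num
  · rw [if_pos h, nwOuter_eq_nwGo num U_gates 0 0 le_rfl h]
    simp
  · rw [if_neg h, nwOuter_neg num U_gates 0 0 le_rfl (by omega)]
    simp
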